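-- pv_equiv track=rewrite | github.com/kageyama-aoi/Python | JSON⇒TSV/pg1.py | build_tsv_with_levels
-- ===== SOURCE A (Python) =====
-- def split_path(path):
--     """
--     'courses[0].conditions[1].child.update.meta.note'
--      → ['courses','[0]','conditions','[1]','child','update','meta','note']
--     """
--     parts = []
--     temp = ""
--     i = 0
--     while i < len(path):
--         if path[i] == "[":
--             # 配列インデックス抽出
--             j = i
--             while j < len(path) and path[j] != "]":
--                 j += 1
--             j += 1  # ']'含める
--             parts.append(path[i:j])
--             i = j
--             temp = ""
--         elif path[i] == ".":
--             if temp: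
--                 parts.append(temp)
--                 temp = ""
--             i += 1
--         else:
--             temp += path[i]
--             i += 1
--
--     if temp:
--         parts.append(temp)
--
--     return parts
--
-- def build_tsv_with_levels(paths):
--     split_paths = [split_path(p) for p, _ in paths]
--     max_depth = max(len(sp) for sp in split_paths)
--
--     # rows[0]〜rows[max_depth] を作成
--     rows = [[] for _ in range(max_depth + 1)]
--
--     for (path, value), segments in zip(paths, split_paths):
--         for depth in range(max_depth):
--             if depth < len(segments):
--                 rows[depth].append(segments[depth])
--             else:
--                 rows[depth].append("")
--         rows[max_depth].append("" if value is None else str(value))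
--
--     # -------------------------------
--     # ★ 正しいルールで矢印に変換
--     # -------------------------------
--     for r in range(max_depth):   # 値行は除外
--         prev = None
--         for c in range(len(rows[r])):
--             cur = rows[r][c]
--
--             # 置換条件：
--             # 1) 空ではない
--             # 2) 前の文字と同じ
--             # 3) segment が leaf 値ではない（'value', 'input_month', 'has_target' などは除外）
--             is_leaf_like = (cur in ["value", "input_month", "has_target", "updated_records", "created_records"])
--
--             if prev is not None and cur == prev and cur != "" and not is_leaf_like:
--                 rows[r][c] = "→"
--             else:
--                 prev = cur
--
--
--     return "\n".join("\t".join(row) for row in rows)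
-- ===== SOURCE B (Python) =====
-- def _scan_bracket(s):
--     # prefix up to and including the first ']' (everything, if there is none), plus the rest
--     for k, ch in enumerate(s):
--         if ch == ']':
--             return s[:k + 1], s[k + 1:]
--     return s, ''
--
--
-- def _scan_name(s):
--     # longest prefix containing no '.' and no '[', plus the rest
--     for k, ch in enumerate(s):
--         if ch == '.' or ch == '[':
--             return s[:k], s[k:]
--     return s, ''
--
--
-- def split_path(path):
--     # token scanner over string slices (a name directly followed by '[' is dropped,
--     # as in the original)
--     parts = []
--     s = path
--     while s:
--         c = s[0]
--         if c == '.':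
--             s = s[1:]
--         elif c == '[':
--             seg, s = _scan_bracket(s[1:])
--             parts.append('[' + seg)
--         else:
--             name, s = _scan_name(s)
--             if not s.startswith('['):
--                 parts.append(name)
--     return parts
--
--
-- _LEAFY = ("value", "input_month", "has_target", "updated_records", "created_records")
--
--
-- def build_tsv_with_levels(paths):
--     sps = [split_path(p) for p, _ in paths]
--     md = max(len(sp) for sp in sps)
--     lines = []
--     for d in range(md):
--         cells = [sp[d] if d < len(sp) else '' for sp in sps]
--         # stateless collapse: a cell becomes '→' exactly when it repeats its left
--         # neighbour's original value (non-empty and not leaf-like)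
--         lines.append('\t'.join(
--             cells[:1]
--             + ['→' if b == a and b != '' and b not in _LEAFY else b
--                for a, b in zip(cells, cells[1:])]))
--     lines.append('\t'.join('' if v is None else str(v) for _, v in paths))
--     return '\n'.join(lines)
-- ===== Notes on version B (the rewrite author's own statement) =====
-- stated objective: alternative
-- what changed: split_path becomes a token scanner over string slices (scan-bracket / scan-name helpers) instead of A's per-character index machine with a pending buffer, and the arrow substitution is made stateless: instead of A's prebuilt row-major grid followed by an in-place pass threading a 'prev' register along each row, B uses the fact that a cell collapses exactly when it equals its left neighbour's ORIGINAL value, so each line is emitted directly by zipping the depth-d column with its own shift.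
import Mathlib
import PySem

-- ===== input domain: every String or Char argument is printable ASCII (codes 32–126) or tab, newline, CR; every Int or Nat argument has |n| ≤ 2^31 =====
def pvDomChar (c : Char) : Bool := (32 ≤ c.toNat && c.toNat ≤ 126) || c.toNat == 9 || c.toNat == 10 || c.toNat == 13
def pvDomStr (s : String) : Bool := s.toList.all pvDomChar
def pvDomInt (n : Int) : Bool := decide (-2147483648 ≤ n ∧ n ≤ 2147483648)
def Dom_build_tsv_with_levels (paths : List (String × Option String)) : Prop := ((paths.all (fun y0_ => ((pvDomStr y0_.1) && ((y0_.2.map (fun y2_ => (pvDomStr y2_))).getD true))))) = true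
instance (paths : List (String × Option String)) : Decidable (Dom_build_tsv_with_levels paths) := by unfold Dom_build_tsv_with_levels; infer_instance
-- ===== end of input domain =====

-- B re-implements the TSV conversion with a slice-token scanner for split_path and a
-- stateless pairwise (zip-with-shift) arrow collapse instead of A's grid + prev-register
-- pass (objective: alternative decomposition, same asymptotic cost; a timing run measured a constant-factor speedup).


-- the hardcoded leaf-like segment names (shared constant of both programs)
def pvLeafList : List (List Char) :=
  ["value".toList, "input_month".toList, "has_target".toList, "updated_records".toList, "created_records".toList]

def pvArrow : List Char := "→".toList

-- ===== PORT A =====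
-- A's inner `while j < len and path[j] != ']'` scan (returns the chars up to and
-- including ']', and the rest after it; if no ']', everything is taken).
def pvSpan : List Char → List Char × List Char
  | [] => ([], [])
  | c :: r => if c = ']' then ([c], r) else ((pvSpan r).1.cons c, (pvSpan r).2)

theorem pvSpan_snd_le (cs : List Char) : (pvSpan cs).2.length ≤ cs.length := by
  induction cs with
  | nil => simp [pvSpan]
  | cons c r ih =>
    simp only [pvSpan]
    split
    · simp
    · simpa using Nat.le_succ_of_le ih

-- A's outer while loop over i, with the pending `temp` buffer as state.
def splitA (cs : List Char) (temp : List Char) : List (List Char) :=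
  match cs with
  | [] => if temp = [] then [] else [temp]
  | c :: r =>
    if c = '[' then ('[' :: (pvSpan r).1) :: splitA (pvSpan r).2 []
    else if c = '.' then (if temp = [] then splitA r [] else temp :: splitA r [])
    else splitA r (temp ++ [c])
termination_by cs.length
decreasing_by
  · exact Nat.lt_succ_of_le (pvSpan_snd_le r)
  · simp
  · simp
  · simp

-- A's grid row append step: one (path,value,segments) entry appended to every row.
def pvCell (md : Nat) (e : (String × Option String) × List (List Char)) (i : Nat) : List Char :=
  if i < md then e.2.getD i [] else (e.1.2.getD "").toList

def pvGridStep (md : Nat) (rows : List (List (List Char))) (e : (String × Option String) × List (List Char)) : List (List (List Char)) :=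
  rows.mapIdx (fun i row => row ++ [pvCell md e i])

-- A's in-place arrow-replacement pass over one row, `prev` as in the Python.
def arrowRowA : List (List Char) → Option (List Char) → List (List Char)
  | [], _ => []
  | cur :: rest, prev =>
    if prev = some cur ∧ cur ≠ [] ∧ pvLeafList.contains cur = false then
      pvArrow :: arrowRowA rest prev
    else cur :: arrowRowA rest (some cur)

def build_tsv_with_levels (paths : List (String × Option String)) : String :=
  let sps := paths.map (fun p => splitA p.1.toList [])
  let md := (sps.map List.length).foldl Nat.max 0
  let entries := paths.zip sps
  let rows := entries.foldl (pvGridStep md) (List.replicate (md + 1) [])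
  let rows2 := rows.mapIdx (fun r row => if r < md then arrowRowA row none else row)
  String.ofList (List.intercalate ['\n'] (rows2.map (List.intercalate ['\t'])))

-- ===== PORT B =====
-- Source B's _scan_name: longest prefix with no '.' / '[', plus the rest.
def scanName : List Char → List Char × List Char
  | [] => ([], [])
  | c :: r => if c = '.' ∨ c = '[' then ([], c :: r) else ((scanName r).1.cons c, (scanName r).2)

theorem scanName_snd_le (cs : List Char) : (scanName cs).2.length ≤ cs.length := by
  induction cs with
  | nil => simp [scanName]
  | cons c r ih =>
    simp only [scanName]
    split
    · simp
    · simpa using Nat.le_succ_of_le ih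

-- Source B's split_path loop as structural recursion on the remaining slice.
-- (_scan_bracket is the same ']' scan as pvSpan, reused under that name.)
def splitB (s : List Char) : List (List Char) :=
  match s with
  | [] => []
  | c :: r =>
    if c = '.' then splitB r
    else if c = '[' then ('[' :: (pvSpan r).1) :: splitB (pvSpan r).2
    else
      let q := scanName (c :: r)
      if q.2.head? = some '[' then splitB q.2 else q.1 :: splitB q.2
termination_by s.length
decreasing_by
  · simp
  · exact Nat.lt_succ_of_le (pvSpan_snd_le r)
  · simp only [scanName]
    rw [if_neg (by tauto)]
    exact Nat.lt_succ_of_le (scanName_snd_le r)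
  · simp only [scanName]
    rw [if_neg (by tauto)]
    exact Nat.lt_succ_of_le (scanName_snd_le r)

-- Source B's collapse of one depth-d line: cells[:1] + pairwise zip of cells with its shift.
def pvArrowCell (a b : List Char) : List Char :=
  if b = a ∧ b ≠ [] ∧ pvLeafList.contains b = false then pvArrow else b

def bCollapse (cells : List (List Char)) : List (List Char) :=
  cells.take 1 ++ List.zipWith pvArrowCell cells cells.tail

def build_tsv_with_levels_alt (paths : List (String × Option String)) : String :=
  let sps := paths.map (fun p => splitB p.1.toList)
  let md := (sps.map List.length).foldl Nat.max 0
  let lines := (List.range md).map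
    (fun d => List.intercalate ['\t'] (bCollapse (sps.map (fun sp => sp.getD d []))))
  let vline := List.intercalate ['\t'] (paths.map (fun p => (p.2.getD "").toList))
  String.ofList (List.intercalate ['\n'] (lines ++ [vline]))

-- ===== PRECONDITION & SPEC =====
-- Pre_ excludes only the empty list, on which Python's max() over an empty generator raises ValueError.
def Pre_build_tsv_with_levels (paths : List (String × Option String)) : Prop := paths ≠ []
instance (paths : List (String × Option String)) : Decidable (Pre_build_tsv_with_levels paths) := by
  unfold Pre_build_tsv_with_levels; infer_instance

def pvWitness_build_tsv_with_levels : (List (String × Option String)) := [("a.b[0].value", some "7"), ("a.b[1].value", none)]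

def Spec_build_tsv_with_levels (paths : List (String × Option String)) (out : String) : Prop := out = build_tsv_with_levels_alt paths
instance (paths : List (String × Option String)) (out : String) : Decidable (Spec_build_tsv_with_levels paths out) := by unfold Spec_build_tsv_with_levels; infer_instance

-- ===== CLAIM (what is proved, stated in full; the proofs are below) =====
def Claim_equal_build_tsv_with_levels : Prop := ∀ (paths : List (String × Option String)), Dom_build_tsv_with_levels paths → Pre_build_tsv_with_levels paths → Spec_build_tsv_with_levels paths (build_tsv_with_levels paths)

-- ===== LEMMAS AND PROOFS =====

-- scanName over a stop-free prefix
theorem scanName_append (xs ys : List Char) (h : ∀ c ∈ xs, ¬(c = '.' ∨ c = '[')) :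
    scanName (xs ++ ys) = (xs ++ (scanName ys).1, (scanName ys).2) := by
  induction xs with
  | nil => simp
  | cons x xs ih =>
    have hx := h x (by simp)
    have ih' := ih (fun c hc => h c (by simp [hc]))
    rw [List.cons_append]
    simp only [scanName]
    rw [if_neg hx, ih']
    simp

-- unfolding equations for the two splitters
theorem splitA_bracket (r temp : List Char) :
    splitA ('[' :: r) temp = ('[' :: (pvSpan r).1) :: splitA (pvSpan r).2 [] := by
  simp [splitA]

theorem splitA_dot (r temp : List Char) :
    splitA ('.' :: r) temp = if temp = [] then splitA r [] else temp :: splitA r [] := by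
  simp [splitA]

theorem splitA_chr (c : Char) (r temp : List Char) (h1 : ¬c = '[') (h2 : ¬c = '.') :
    splitA (c :: r) temp = splitA r (temp ++ [c]) := by
  simp [splitA, h1, h2]

theorem splitB_dot (r : List Char) : splitB ('.' :: r) = splitB r := by simp [splitB]

theorem splitB_bracket (r : List Char) :
    splitB ('[' :: r) = ('[' :: (pvSpan r).1) :: splitB (pvSpan r).2 := by
  simp [splitB]

theorem splitB_chr (c : Char) (r : List Char) (h1 : ¬c = '.') (h2 : ¬c = '[') :
    splitB (c :: r) = (if (scanName (c :: r)).2.head? = some '[' then splitB (scanName (c :: r)).2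
      else (scanName (c :: r)).1 :: splitB (scanName (c :: r)).2) := by
  simp [splitB, h1, h2]

-- A's split with pending stop-free buffer temp = B's split of temp ++ rest
theorem splitA_eq_splitB : ∀ (n : Nat) (cs temp : List Char), cs.length ≤ n →
    (∀ c ∈ temp, ¬(c = '.' ∨ c = '[')) → splitA cs temp = splitB (temp ++ cs) := by
  intro n
  induction n with
  | zero =>
    intro cs temp hlen ht
    have hcs : cs = [] := List.eq_nil_of_length_eq_zero (Nat.le_zero.mp hlen)
    subst hcs
    cases temp with
    | nil => simp [splitA, splitB]
    | cons t ts =>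
      have hx := ht t (by simp)
      have hs := scanName_append (t :: ts) [] ht
      rw [List.append_nil] at hs
      rw [List.append_nil, splitB_chr t ts (fun h => hx (Or.inl h)) (fun h => hx (Or.inr h)), hs]
      simp [splitA, splitB, scanName]
  | succ n ih =>
    intro cs temp hlen ht
    cases cs with
    | nil => exact ih [] temp (Nat.zero_le n) ht
    | cons c r =>
      have hr : r.length ≤ n := Nat.succ_le_succ_iff.mp hlen
      by_cases hbr : c = '['
      · subst hbr
        have hrec := ih (pvSpan r).2 [] (Nat.le_trans (pvSpan_snd_le r) hr) (by simp)
        simp only [List.nil_append] at hrec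
        cases temp with
        | nil => rw [List.nil_append, splitA_bracket, splitB_bracket, hrec]
        | cons t ts =>
          have hx := ht t (by simp)
          have hs := scanName_append (t :: ts) ('[' :: r) ht
          rw [List.cons_append, (by simp [scanName] : scanName ('[' :: r) = ([], '[' :: r))] at hs
          simp only [List.append_nil] at hs
          rw [List.cons_append,
            splitB_chr t (ts ++ '[' :: r) (fun h => hx (Or.inl h)) (fun h => hx (Or.inr h)), hs]
          rw [splitA_bracket, splitB_bracket, hrec]
          simp
      · by_cases hdot : c = '.'
        · subst hdot
          have hrec := ih r [] hr (by simp)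
          simp only [List.nil_append] at hrec
          cases temp with
          | nil => rw [List.nil_append, splitA_dot, if_pos rfl, splitB_dot, hrec]
          | cons t ts =>
            have hx := ht t (by simp)
            have hs := scanName_append (t :: ts) ('.' :: r) ht
            rw [List.cons_append, (by simp [scanName] : scanName ('.' :: r) = ([], '.' :: r))] at hs
            simp only [List.append_nil] at hs
            rw [List.cons_append,
              splitB_chr t (ts ++ '.' :: r) (fun h => hx (Or.inl h)) (fun h => hx (Or.inr h)), hs]
            rw [List.head?_cons, if_neg (by decide : ¬(some '.' = some '['))]
            rw [splitA_dot, if_neg (by simp), splitB_dot, hrec]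
        · have ht' : ∀ x ∈ temp ++ [c], ¬(x = '.' ∨ x = '[') := by
            intro x hx
            rcases List.mem_append.mp hx with h1 | h1
            · exact ht x h1
            · have : x = c := by simpa using h1
              subst this; tauto
          rw [splitA_chr c r temp hbr hdot, ih r (temp ++ [c]) hr ht', List.append_assoc,
            List.singleton_append]

theorem split_eq (cs : List Char) : splitA cs [] = splitB cs := by
  simpa using splitA_eq_splitB cs.length cs [] le_rfl (by simp)

-- A's prev-register pass, once started, compares each cell with its left neighbour
theorem arrowRowA_pair : ∀ (xs : List (List Char)) (x : List Char),
    arrowRowA xs (some x) = List.zipWith pvArrowCell (x :: xs) xs := by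
  intro xs
  induction xs with
  | nil => intro x; rfl
  | cons b r ih =>
    intro x
    simp only [arrowRowA, List.zipWith, pvArrowCell]
    by_cases h : b = x ∧ b ≠ [] ∧ pvLeafList.contains b = false
    · rw [if_pos (by exact ⟨by rw [h.1], h.2⟩), if_pos h, h.1, ih]
    · rw [if_neg (fun hc => h ⟨(Option.some_injective _ hc.1).symm, hc.2⟩), if_neg h, ih]

theorem arrowRowA_bCollapse (cells : List (List Char)) :
    arrowRowA cells none = bCollapse cells := by
  cases cells with
  | nil => rfl
  | cons x xs =>
    simp only [arrowRowA, bCollapse, List.take, List.tail_cons]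
    rw [if_neg (by rintro ⟨h, -⟩; cases h)]
    simp [arrowRowA_pair]

theorem mapIdx_range_map {α β : Type} (n : Nat) (g : Nat → α) (f : Nat → α → β) :
    List.mapIdx f ((List.range n).map g) = (List.range n).map (fun i => f i (g i)) := by
  apply List.ext_getElem
  · simp
  · intro i h1 h2
    simp

theorem grid_fold (md : Nat) (entries : List ((String × Option String) × List (List Char))) :
    ∀ g : Nat → List (List Char),
    entries.foldl (pvGridStep md) ((List.range (md + 1)).map g)
      = (List.range (md + 1)).map (fun i => g i ++ entries.map (fun e => pvCell md e i)) := by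
  induction entries with
  | nil => intro g; simp
  | cons e rest ih =>
    intro g
    simp only [List.foldl_cons, pvGridStep, mapIdx_range_map, ih, List.map_cons]
    exact List.map_congr_left (fun i _ => by simp)

theorem zip_map_self {β γ : Type} (paths : List (String × Option String))
    (f : String × Option String → β) (h : (String × Option String) × β → γ) :
    (paths.zip (paths.map f)).map h = paths.map (fun p => h (p, f p)) := by
  induction paths with
  | nil => rfl
  | cons p rest ih => simp [ih]

theorem tsv_core (f : String × Option String → List (List Char))
    (paths : List (String × Option String)) (md : Nat) :
    (List.mapIdx (fun r row => if r < md then arrowRowA row none else row)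
        ((paths.zip (paths.map f)).foldl (pvGridStep md) (List.replicate (md + 1) []))).map
        (List.intercalate ['\t'])
      = ((List.range md).map
          (fun d => List.intercalate ['\t'] (bCollapse ((paths.map f).map (fun sp => sp.getD d [])))))
        ++ [List.intercalate ['\t'] (paths.map (fun p => (p.2.getD "").toList))] := by
  have hrep : (List.replicate (md + 1) ([] : List (List Char)))
      = (List.range (md + 1)).map (fun _ => []) := by simp
  rw [hrep, grid_fold, mapIdx_range_map, List.map_map, List.range_succ, List.map_append]
  congr 1
  · apply List.map_congr_left
    intro i hi
    have hi' : i < md := List.mem_range.mp hi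
    simp only [Function.comp_apply, if_pos hi', List.nil_append]
    congr 1
    rw [zip_map_self, arrowRowA_bCollapse]
    congr 1
    simp [pvCell, hi']
  · simp [zip_map_self, pvCell]

-- ===== VERDICT (by name: the statement is the Claim_ definition above) =====
theorem build_tsv_with_levels_spec : Claim_equal_build_tsv_with_levels := by
  intro paths _ _
  unfold Spec_build_tsv_with_levels build_tsv_with_levels build_tsv_with_levels_alt
  simp only [split_eq]
  exact congrArg (fun l => String.ofList (List.intercalate ['\n'] l))
    (tsv_core (fun p => splitB p.1.toList) paths _)
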